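-- pv_equiv track=rewrite | github.com/dustinsnoap/Legends_of_Alabastra | pictobit.py | createColorDict
-- ===== SOURCE A (Python) =====
-- def createColorDict(image):
--     color_dict = dict()
--     counter = 1
--     for row in image:
--         for col in row:
--             if col != 0 and col not in color_dict:
--                 color_dict[col] = counter
--                 counter += 1
--     return color_dict
-- ===== SOURCE B (Python) =====
-- def createColorDict(image):
--     flat = [p for row in image for p in row]
--     return {p: len({q for q in flat[:i] if q != 0}) + 1
--             for i, p in enumerate(flat)
--             if p != 0 and p not in flat[:i]}
-- ===== Notes on version B (the rewrite author's own statement) =====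
-- stated objective: alternative
-- what changed: B removes A's running counter and mutable dict state: it flattens the image and, for each first occurrence of a nonzero pixel at position i, computes its index independently as 1 + the number of distinct nonzero pixels in the prefix flat[:i], a rank-by-prefix comprehension instead of A's stateful counter loop (slower on large inputs, but a genuinely different computation of the same values).
import Mathlib
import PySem

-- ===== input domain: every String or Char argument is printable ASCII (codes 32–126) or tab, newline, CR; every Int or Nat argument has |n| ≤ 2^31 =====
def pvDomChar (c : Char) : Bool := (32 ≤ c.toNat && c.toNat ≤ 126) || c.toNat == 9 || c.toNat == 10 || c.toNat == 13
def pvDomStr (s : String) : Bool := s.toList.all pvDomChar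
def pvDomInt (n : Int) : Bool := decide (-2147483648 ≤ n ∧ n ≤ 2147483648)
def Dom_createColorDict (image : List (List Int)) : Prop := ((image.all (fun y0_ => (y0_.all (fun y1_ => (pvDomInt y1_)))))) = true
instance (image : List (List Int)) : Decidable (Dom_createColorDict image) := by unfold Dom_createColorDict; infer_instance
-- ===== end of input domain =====

-- B drops the running counter entirely: each nonzero pixel first seen at position i gets
-- index 1 + (number of distinct nonzero pixels strictly before i), computed per key from
-- the prefix flat[:i]; an O(n^2) rank-by-prefix formulation vs A's O(n) counter loop.

-- ===== PORT A =====
-- A's loop state: (color_dict, counter)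
def pvStepA (st : PySem.Dict Int Int × Int) (col : Int) : PySem.Dict Int Int × Int :=
  if col ≠ 0 ∧ st.1.contains col = false then (st.1.insert col st.2, st.2 + 1) else st

def createColorDict (image : List (List Int)) : List (Int × Int) :=
  let st := image.foldl (fun st row => row.foldl pvStepA st) (PySem.Dict.empty, (1 : Int))
  st.1.items

-- ===== PORT B =====
-- flat = [p for row in image for p in row];
-- {p: len({q for q in flat[:i] if q != 0}) + 1 for i, p in enumerate(flat) if p != 0 and p not in flat[:i]}
def pvStepB (flat : List Int) (d : PySem.Dict Int Int) (ip : Int × Int) : PySem.Dict Int Int :=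
  if ip.2 ≠ 0 ∧ ip.2 ∉ PySem.List.slice flat none (some ip.1) then
    d.insert ip.2
      (((PySem.Set.ofList ((PySem.List.slice flat none (some ip.1)).filter (fun q => !(q == 0)))).length : Int) + 1)
  else d

def createColorDict_alt (image : List (List Int)) : List (Int × Int) :=
  let flat := image.flatten
  ((PySem.List.enumerate flat 0).foldl (pvStepB flat) PySem.Dict.empty).items

-- ===== PRECONDITION & SPEC =====
def Spec_createColorDict (image : List (List Int)) (out : List (Int × Int)) : Prop := out = createColorDict_alt image
instance (image : List (List Int)) (out : List (Int × Int)) : Decidable (Spec_createColorDict image out) := by unfold Spec_createColorDict; infer_instance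

-- ===== CLAIM (what is proved, stated in full; the proofs are below) =====
def Claim_equal_createColorDict : Prop := ∀ (image : List (List Int)), Dom_createColorDict image → Spec_createColorDict image (createColorDict image)

-- ===== LEMMAS AND PROOFS =====

-- the common normal form: first occurrences of nonzero pixels, numbered from 1
def pvBflat (xs : List Int) : List (Int × Int) :=
  (PySem.List.enumerate (PySem.List.dedup (xs.filter (fun p => !(p == 0)))) 1).map (fun p => (p.2, p.1))

theorem pvMain (xs : List Int) :
    (xs.foldl pvStepA (PySem.Dict.empty, (1 : Int))).1.items = pvBflat xs ∧
    (xs.foldl pvStepA (PySem.Dict.empty, (1 : Int))).2 =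
      ((xs.foldl pvStepA (PySem.Dict.empty, (1 : Int))).1.items.length : Int) + 1 := by
  induction xs using List.reverseRecOn with
  | nil => exact ⟨rfl, by simp⟩
  | append_singleton xs x ih =>
    obtain ⟨hitems, hc⟩ := ih
    set st := xs.foldl pvStepA (PySem.Dict.empty, (1 : Int)) with hst
    have hfold : (xs ++ [x]).foldl pvStepA (PySem.Dict.empty, (1 : Int)) = pvStepA st x := by
      simp [List.foldl_append, hst]
    set uniq := PySem.List.dedup (xs.filter (fun p => !(p == 0))) with huniq
    have hkeys : st.1.keys = uniq := by
      have : st.1.keys = st.1.items.map (·.1) := rfl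
      rw [this, hitems]
      simp [pvBflat, huniq]
      exact PySem.List.map_snd_enumerate _ _
    have hcont : st.1.contains x = decide (x ∈ uniq) := by
      rw [PySem.Dict.contains_eq_decide_mem_keys, hkeys]
    have hlen : (st.1.items.length : Int) = (uniq.length : Int) := by
      rw [hitems]; simp [pvBflat, huniq, PySem.List.length_enumerate]
    by_cases hx0 : x = 0
    · have hstep : pvStepA st x = st := by simp [pvStepA, hx0]
      rw [hfold, hstep]
      constructor
      · rw [hitems]; simp [pvBflat, hx0]
      · exact hc
    · by_cases hmem : x ∈ uniq
      · have hstep : pvStepA st x = st := by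
          simp [pvStepA, hcont, hmem]
        rw [hfold, hstep]
        have hfilter : (xs ++ [x]).filter (fun p => !(p == 0)) =
            xs.filter (fun p => !(p == 0)) ++ [x] := by simp [List.filter_append, hx0]
        have hded : PySem.List.dedup ((xs ++ [x]).filter (fun p => !(p == 0))) = uniq := by
          rw [hfilter]
          simp only [PySem.List.dedup_eq_ofList, PySem.Set.ofList_eq_foldl, List.foldl_append]
          rw [← PySem.Set.ofList_eq_foldl, ← PySem.List.dedup_eq_ofList, ← huniq]
          simp [PySem.Set.add, PySem.Set.contains, hmem]
        constructor
        · rw [hitems]; simp only [pvBflat, hded, huniq]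
        · exact hc
      · have hstep : pvStepA st x = (st.1.insert x st.2, st.2 + 1) := by
          simp [pvStepA, hcont, hmem, hx0]
        have hnotc : st.1.contains x = false := by simp [hcont, hmem]
        have hins : (st.1.insert x st.2).items = st.1.items ++ [(x, st.2)] :=
          PySem.Dict.items_insert_of_not_contains st.1 st.2 hnotc
        have hfilter : (xs ++ [x]).filter (fun p => !(p == 0)) =
            xs.filter (fun p => !(p == 0)) ++ [x] := by simp [List.filter_append, hx0]
        have hded : PySem.List.dedup ((xs ++ [x]).filter (fun p => !(p == 0))) = uniq ++ [x] := by
          rw [hfilter]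
          simp only [PySem.List.dedup_eq_ofList, PySem.Set.ofList_eq_foldl, List.foldl_append]
          rw [← PySem.Set.ofList_eq_foldl, ← PySem.List.dedup_eq_ofList, ← huniq]
          simp [PySem.Set.add, PySem.Set.contains, hmem]
        have hBnew : pvBflat (xs ++ [x]) = pvBflat xs ++ [(x, (uniq.length : Int) + 1)] := by
          simp only [pvBflat, hded, huniq, PySem.List.enumerate_append, List.map_append]
          simp [PySem.List.enumerate, Int.add_comm]
        rw [hfold, hstep]
        constructor
        · rw [hins, hitems, hBnew, hc, hlen]
        · rw [hins, hc, hlen]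
          simp
          omega

-- pvStepB only looks at prefixes strictly shorter than the index, so the closure list
-- may be extended on the right without changing the fold over the old indices
theorem pvStepB_congr (xs : List Int) (x : Int) :
    (PySem.List.enumerate xs 0).foldl (pvStepB (xs ++ [x])) PySem.Dict.empty =
    (PySem.List.enumerate xs 0).foldl (pvStepB xs) PySem.Dict.empty := by
  apply PySem.List.foldl_congr_mem
  intro acc p hp
  rcases (PySem.List.mem_enumerate_iff _ _ _).1 hp with ⟨k, hk, rfl⟩
  have h1 : PySem.List.slice (xs ++ [x]) none (some ((0 : Int) + (k : Nat))) =
      PySem.List.slice xs none (some ((0 : Int) + (k : Nat))) := by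
    have : ((0 : Int) + (k : Nat)) = ((k : Nat) : Int) := by omega
    rw [this, PySem.List.slice_to_natCast, PySem.List.slice_to_natCast,
      List.take_append_of_le_length (by omega)]
  simp only [pvStepB, h1]

-- B's fold over xs computes exactly pvBflat xs
theorem pvBmain (xs : List Int) :
    ((PySem.List.enumerate xs 0).foldl (pvStepB xs) PySem.Dict.empty).items = pvBflat xs := by
  induction xs using List.reverseRecOn with
  | nil => rfl
  | append_singleton xs x ih =>
    set uniq := PySem.List.dedup (xs.filter (fun p => !(p == 0))) with huniq
    set d := (PySem.List.enumerate xs 0).foldl (pvStepB xs) PySem.Dict.empty with hd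
    have hfold : (PySem.List.enumerate (xs ++ [x]) 0).foldl (pvStepB (xs ++ [x])) PySem.Dict.empty
        = pvStepB (xs ++ [x]) d ((0 : Int) + xs.length, x) := by
      rw [PySem.List.enumerate_append]
      rw [List.foldl_append, pvStepB_congr, ← hd]
      simp [PySem.List.enumerate]
    have hslice : PySem.List.slice (xs ++ [x]) none (some ((0 : Int) + xs.length)) = xs := by
      have : ((0 : Int) + xs.length) = ((xs.length : Nat) : Int) := by omega
      rw [this, PySem.List.slice_to_natCast]
      simp
    by_cases hcond : x ≠ 0 ∧ x ∉ xs
    · have hstep : pvStepB (xs ++ [x]) d ((0 : Int) + xs.length, x) =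
          d.insert x (((PySem.Set.ofList (xs.filter (fun q => !(q == 0)))).length : Int) + 1) := by
        simp only [pvStepB, hslice]
        rw [if_pos hcond]
      have hmemu : x ∉ uniq := by
        rw [huniq, PySem.List.mem_dedup]
        intro hmem
        exact hcond.2 (List.mem_of_mem_filter hmem)
      have hkeys : d.keys = uniq := by
        have : d.keys = d.items.map (·.1) := rfl
        rw [this, ih]
        simp [pvBflat, huniq]
        exact PySem.List.map_snd_enumerate _ _
      have hnotc : d.contains x = false := by
        rw [PySem.Dict.contains_eq_decide_mem_keys, hkeys]
        simp [hmemu]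
      have hins := PySem.Dict.items_insert_of_not_contains d
        (((PySem.Set.ofList (xs.filter (fun q => !(q == 0)))).length : Int) + 1) hnotc
      have hfilter : (xs ++ [x]).filter (fun p => !(p == 0)) =
          xs.filter (fun p => !(p == 0)) ++ [x] := by simp [List.filter_append, hcond.1]
      have hded : PySem.List.dedup ((xs ++ [x]).filter (fun p => !(p == 0))) = uniq ++ [x] := by
        rw [hfilter]
        simp only [PySem.List.dedup_eq_ofList, PySem.Set.ofList_eq_foldl, List.foldl_append]
        rw [← PySem.Set.ofList_eq_foldl, ← PySem.List.dedup_eq_ofList, ← huniq]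
        simp [PySem.Set.add, PySem.Set.contains, hmemu]
      have hsetlen : (PySem.Set.ofList (xs.filter (fun q => !(q == 0)))).length = uniq.length := by
        rw [huniq, PySem.List.dedup_eq_ofList]
      have hBnew : pvBflat (xs ++ [x]) = pvBflat xs ++ [(x, (uniq.length : Int) + 1)] := by
        simp only [pvBflat, hded, huniq, PySem.List.enumerate_append, List.map_append]
        simp [PySem.List.enumerate, Int.add_comm]
      rw [hfold, hstep, hins, ih, hBnew, hsetlen]
    · have hstep : pvStepB (xs ++ [x]) d ((0 : Int) + xs.length, x) = d := by
        simp only [pvStepB, hslice]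
        rw [if_neg hcond]
      have hBold : pvBflat (xs ++ [x]) = pvBflat xs := by
        rcases not_and_or.1 hcond with h0 | hm
        · have hx0 : x = 0 := by omega
          simp [pvBflat, hx0]
        · have hmem : x ∈ xs := not_not.1 hm
          by_cases hx0 : x = 0
          · simp [pvBflat, hx0]
          · have hmemu : x ∈ uniq := by
              rw [huniq, PySem.List.mem_dedup, List.mem_filter]
              exact ⟨hmem, by simp [hx0]⟩
            have hfilter : (xs ++ [x]).filter (fun p => !(p == 0)) =
                xs.filter (fun p => !(p == 0)) ++ [x] := by simp [List.filter_append, hx0]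
            have hded : PySem.List.dedup ((xs ++ [x]).filter (fun p => !(p == 0))) = uniq := by
              rw [hfilter]
              simp only [PySem.List.dedup_eq_ofList, PySem.Set.ofList_eq_foldl, List.foldl_append]
              rw [← PySem.Set.ofList_eq_foldl, ← PySem.List.dedup_eq_ofList, ← huniq]
              simp [PySem.Set.add, PySem.Set.contains, hmemu]
            simp only [pvBflat, hded, huniq]
      rw [hfold, hstep, ih, hBold]

-- A over the nested image equals A over the flattened pixel list
theorem pvFlatten (image : List (List Int)) :
    image.foldl (fun st row => row.foldl pvStepA st) (PySem.Dict.empty, (1 : Int)) =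
      image.flatten.foldl pvStepA (PySem.Dict.empty, (1 : Int)) := by
  rw [List.foldl_flatten]

-- ===== VERDICT (by name: the statement is the Claim_ definition above) =====
theorem createColorDict_spec : Claim_equal_createColorDict := by
  intro image _
  unfold Spec_createColorDict createColorDict createColorDict_alt
  rw [pvFlatten]
  rw [pvBmain]
  exact (pvMain image.flatten).1
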